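-- pv_equiv track=rewrite | github.com/SuzuNohara/AIpRog | practicas/prac3/vacumworld3.py | calculate_world_statistics
-- ===== SOURCE A (Python) =====
-- def calculate_world_statistics(world):
--     total_cells = len(world) * len(world[0])
--     dirty_cells = sum(row.count('\u2591\u2591') + row.count('\u2592\u2592') for row in world)
--     obstacle_cells = sum(row.count('\u2588\u2588') for row in world)
--     clean_cells = total_cells - dirty_cells - obstacle_cells
--     return {
--         "Total Cells": total_cells,
--         "Dirty Cells": dirty_cells,
--         "Obstacle Cells": obstacle_cells,
--         "Clean Cells": clean_cells
--     }
-- ===== SOURCE B (Python) =====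
-- def calculate_world_statistics(world):
--     # sort-then-scan: flatten, sort the cells, then one run-length sweep over
--     # the sorted list classifies each run of equal cells at its head only
--     cells = sorted(cell for row in world for cell in row)
--     total_cells = len(world) * len(world[0])
--     dirty_cells = 0
--     obstacle_cells = 0
--     i = 0
--     n = len(cells)
--     while i < n:
--         j = i + 1
--         while j < n and cells[j] == cells[i]:
--             j += 1
--         if cells[i] == '\u2591\u2591' or cells[i] == '\u2592\u2592':
--             dirty_cells += j - i
--         elif cells[i] == '\u2588\u2588':
--             obstacle_cells += j - i
--         i = j
--     return {
--         "Total Cells": total_cells,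
--         "Dirty Cells": dirty_cells,
--         "Obstacle Cells": obstacle_cells,
--         "Clean Cells": total_cells - dirty_cells - obstacle_cells
--     }
-- ===== Notes on version B (the rewrite author's own statement) =====
-- stated objective: alternative
-- what changed: Replaces A's three per-pattern .count scans of every row with a sort-then-scan: flatten the grid, sort the cells, and count each pattern as the length of its run in one sweep over the sorted list.
-- outside the precondition, e.g. on calculate_world_statistics([]): A raises IndexError, B raises IndexError
import Mathlib
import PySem

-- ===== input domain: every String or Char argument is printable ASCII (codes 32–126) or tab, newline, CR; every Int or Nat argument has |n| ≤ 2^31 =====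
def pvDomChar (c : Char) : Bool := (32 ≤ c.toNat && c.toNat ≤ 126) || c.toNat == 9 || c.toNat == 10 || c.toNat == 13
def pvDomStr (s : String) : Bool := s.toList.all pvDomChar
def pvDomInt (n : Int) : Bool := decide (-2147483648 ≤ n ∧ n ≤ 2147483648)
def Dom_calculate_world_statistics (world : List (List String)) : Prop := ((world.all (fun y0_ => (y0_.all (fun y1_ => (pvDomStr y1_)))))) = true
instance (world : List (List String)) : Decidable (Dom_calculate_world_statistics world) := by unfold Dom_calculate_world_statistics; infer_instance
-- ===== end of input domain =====

-- B replaces A's per-pattern row scans with a sort-then-scan: flatten, sort the cells, one run-length sweep; return-value equivalence on non-empty worlds.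


-- ===== PORT A =====
def calculate_world_statistics (world : List (List String)) : List (String × Int) :=
  let total_cells : Int := (world.length : Int) * (((PySem.List.pyGet? world 0).getD []).length : Int)
  let dirty_cells : Int := (world.map (fun row => (PySem.List.count row "░░" : Int) + (PySem.List.count row "▒▒" : Int))).sum
  let obstacle_cells : Int := (world.map (fun row => (PySem.List.count row "██" : Int))).sum
  let clean_cells : Int := total_cells - dirty_cells - obstacle_cells
  [("Total Cells", total_cells), ("Dirty Cells", dirty_cells),
   ("Obstacle Cells", obstacle_cells), ("Clean Cells", clean_cells)]

-- ===== PORT B =====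
-- outer while: one step per run; inner while 'j += 1 while cells[j] == cells[i]'
-- measures the run (1 + takeWhile length), then the scan resumes past it (dropWhile)
def pvScanRuns : List String → Int × Int
  | [] => (0, 0)
  | c :: rest =>
      let run : Int := 1 + ((rest.takeWhile (fun x => x == c)).length : Int)
      let acc := pvScanRuns (rest.dropWhile (fun x => x == c))
      if c == "░░" || c == "▒▒" then (acc.1 + run, acc.2)
      else if c == "██" then (acc.1, acc.2 + run)
      else acc
termination_by xs => xs.length
decreasing_by
  exact Nat.lt_succ_of_le (List.length_dropWhile_le _ _)

def calculate_world_statistics_alt (world : List (List String)) : List (String × Int) :=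
  let cells := PySem.List.sorted (world.flatMap (fun row => row)) (fun x => x) false
  let total_cells : Int := (world.length : Int) * (((PySem.List.pyGet? world 0).getD []).length : Int)
  let acc := pvScanRuns cells
  [("Total Cells", total_cells), ("Dirty Cells", acc.1),
   ("Obstacle Cells", acc.2), ("Clean Cells", total_cells - acc.1 - acc.2)]

-- ===== PRECONDITION & SPEC =====
-- Pre_ excludes only the empty world, on which A's world[0] raises IndexError (B raises there too).
def Pre_calculate_world_statistics (world : List (List String)) : Prop := world ≠ []
instance (world : List (List String)) : Decidable (Pre_calculate_world_statistics world) := by unfold Pre_calculate_world_statistics; infer_instance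
def pvWitness_calculate_world_statistics : List (List String) := [["..", "xx"]]
def Spec_calculate_world_statistics (world : List (List String)) (out : List (String × Int)) : Prop := out = calculate_world_statistics_alt world
instance (world : List (List String)) (out : List (String × Int)) : Decidable (Spec_calculate_world_statistics world out) := by unfold Spec_calculate_world_statistics; infer_instance

-- ===== CLAIM =====
def Claim_equal_calculate_world_statistics : Prop := ∀ (world : List (List String)), Dom_calculate_world_statistics world → Pre_calculate_world_statistics world → Spec_calculate_world_statistics world (calculate_world_statistics world)

-- ===== LEMMAS AND PROOFS =====
-- countP of a constant-member list
theorem countP_of_all_eq {c : String} (p : String → Bool) :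
    ∀ (l : List String), (∀ x ∈ l, x = c) → l.countP p = if p c then l.length else 0 := by
  intro l
  induction l with
  | nil => simp
  | cons a t ih =>
      intro h
      have ha : a = c := h a (by simp)
      have ht := ih (fun x hx => h x (by simp [hx]))
      by_cases hp : p c <;> simp [ha, ht, hp]

-- the run sweep computes the two countP's of the whole list (sorted or not)
theorem pvScanRuns_eq (xs : List String) :
    pvScanRuns xs = ((xs.countP (fun c => c == "░░" || c == "▒▒") : Int),
                     (xs.countP (fun c => c == "██") : Int)) := by
  match xs with
  | [] => simp [pvScanRuns]
  | c :: rest =>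
    have ih := pvScanRuns_eq (rest.dropWhile (fun x => x == c))
    have hsplit : rest.takeWhile (fun x => x == c) ++ rest.dropWhile (fun x => x == c) = rest :=
      List.takeWhile_append_dropWhile
    have hall : ∀ x ∈ rest.takeWhile (fun x => x == c), x = c := by
      intro x hx
      exact eq_of_beq (List.mem_takeWhile_imp (p := fun x => x == c) hx)
    have hd' : rest.countP (fun c => c == "░░" || c == "▒▒")
        = (if (c == "░░" || c == "▒▒") then (rest.takeWhile (fun x => x == c)).length else 0)
          + (rest.dropWhile (fun x => x == c)).countP (fun c => c == "░░" || c == "▒▒") := by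
      rw [← hsplit, List.countP_append,
        countP_of_all_eq (c := c) (fun c => c == "░░" || c == "▒▒") _ hall]
      simp [hsplit]
    have ho' : rest.countP (fun c => c == "██")
        = (if (c == "██") then (rest.takeWhile (fun x => x == c)).length else 0)
          + (rest.dropWhile (fun x => x == c)).countP (fun c => c == "██") := by
      rw [← hsplit, List.countP_append,
        countP_of_all_eq (c := c) (fun c => c == "██") _ hall]
      simp [hsplit]
    rw [pvScanRuns, ih]
    by_cases h1 : (c == "░░" || c == "▒▒") = true
    · have h2 : (c == "██") = false := by
        rcases Bool.or_eq_true_iff.mp h1 with h | h <;> simp [eq_of_beq h]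
      simp only [h1, h2, if_true, Bool.false_eq_true, List.countP_cons, hd', ho',
        Prod.ext_iff]
      constructor <;> · push_cast; omega
    · by_cases h2 : (c == "██") = true
      · simp only [h1, h2, if_true, List.countP_cons, hd', ho', Prod.ext_iff]
        constructor <;> · push_cast; omega
      · simp only [h1, h2, hd', ho', Prod.ext_iff, List.countP_cons]
        constructor <;> · push_cast; omega
termination_by xs.length
decreasing_by exact Nat.lt_succ_of_le (List.length_dropWhile_le _ _)

-- countP of an 'or' of two distinct literals splits into two counts
theorem countP_or_two (l : List String) :
    l.countP (fun c => c == "░░" || c == "▒▒") = l.count "░░" + l.count "▒▒" := by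
  induction l with
  | nil => simp
  | cons a t ih =>
      by_cases h1 : a = "░░" <;> by_cases h2 : a = "▒▒" <;>
        simp_all <;> omega

theorem countP_flatMap_int (p : String → Bool) (world : List (List String)) :
    (((world.flatMap (fun row => row)).countP p : Int))
      = (world.map (fun row => (row.countP p : Int))).sum := by
  induction world with
  | nil => simp
  | cons r rs ih =>
      simp only [List.flatMap_cons, List.countP_append, List.map_cons, List.sum_cons, ← ih]
      push_cast
      ring

-- ===== VERDICT =====
theorem calculate_world_statistics_spec : Claim_equal_calculate_world_statistics := by
  intro world _ _
  unfold Spec_calculate_world_statistics calculate_world_statistics calculate_world_statistics_alt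
  have hperm := PySem.List.sorted_perm (world.flatMap (fun row => row)) (fun x => x) false
  have hmap1 : (fun (row : List String) => ((row.countP (fun c => c == "░░" || c == "▒▒") : Nat) : Int))
      = fun (row : List String) => ((List.count "░░" row : Int) + (List.count "▒▒" row : Int)) := by
    funext row
    rw [countP_or_two]
    push_cast
    ring
  have hmap2 : (fun (row : List String) => ((row.countP (fun c => c == "██") : Nat) : Int))
      = fun (row : List String) => ((List.count "██" row : Int)) := by
    funext row
    rfl
  simp only [pvScanRuns_eq, hperm.countP_eq, countP_flatMap_int, hmap1, hmap2,
    PySem.List.count_eq]
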